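-- pv_equiv track=rewrite | github.com/mark403-A/Mark.reflected | Hexadecimal-Encoding.py | selectively_hex_encode
-- ===== SOURCE A (Python) =====
-- def selectively_hex_encode(payload, times=1):
--     # Encode only < and > characters, up to 'times' times
--     for _ in range(times):
--         new_payload = []
--         for c in payload:
--             if c == '<':
--                 new_payload.append('%3C')
--             elif c == '>':
--                 new_payload.append('%3E')
--             else:
--                 new_payload.append(c)
--         payload = ''.join(new_payload)
--     return payload
-- ===== SOURCE B (Python) =====
-- def selectively_hex_encode(payload, times=1):
--     # One replace pass suffices: encoding is idempotent ('%3C'/'%3E' contain no '<' or '>').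
--     if times >= 1:
--         return payload.replace('<', '%3C').replace('>', '%3E')
--     return payload
-- ===== Notes on version B (the rewrite author's own statement) =====
-- stated objective: faster
-- what changed: Collapses the outer repetition loop over the character-by-character list-building pass into a single pair of str.replace passes, using the fact that the encoding is idempotent since %3C and %3E contain no angle brackets.
import Mathlib
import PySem

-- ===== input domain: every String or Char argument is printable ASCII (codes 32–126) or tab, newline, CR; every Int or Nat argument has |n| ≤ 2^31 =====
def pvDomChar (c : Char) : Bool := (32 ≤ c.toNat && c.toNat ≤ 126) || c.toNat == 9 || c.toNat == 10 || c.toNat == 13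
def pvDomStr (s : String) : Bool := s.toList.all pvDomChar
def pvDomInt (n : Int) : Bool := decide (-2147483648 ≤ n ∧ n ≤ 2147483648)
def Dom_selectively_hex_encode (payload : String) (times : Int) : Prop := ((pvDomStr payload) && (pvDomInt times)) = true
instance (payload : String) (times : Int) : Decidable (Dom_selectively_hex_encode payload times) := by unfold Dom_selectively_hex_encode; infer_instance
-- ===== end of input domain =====

-- B replaces A's repeat-`times` char-by-char rebuilding loop with at most one pair of
-- str.replace passes (the encoding is idempotent), an asymptotically faster re-implementation.


-- ===== PORT A =====
-- one iteration of A's outer loop: build new_payload char by char, then ''.join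
def pvHexStep (payload : String) : String :=
  String.ofList (payload.toList.foldl (fun acc c =>
    acc ++ (if c = '<' then ['%', '3', 'C']
            else if c = '>' then ['%', '3', 'E']
            else [c])) [])

def selectively_hex_encode (payload : String) (times : Int) : String :=
  (PySem.List.pyRange 0 times 1).foldl (fun p _ => pvHexStep p) payload

-- ===== PORT B =====
def selectively_hex_encode_alt (payload : String) (times : Int) : String :=
  if 1 ≤ times then
    PySem.Str.replace (PySem.Str.replace payload "<" "%3C") ">" "%3E"
  else payload

-- ===== PRECONDITION & SPEC =====
def Spec_selectively_hex_encode (payload : String) (times : Int) (out : String) : Prop := out = selectively_hex_encode_alt payload times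
instance (payload : String) (times : Int) (out : String) : Decidable (Spec_selectively_hex_encode payload times out) := by unfold Spec_selectively_hex_encode; infer_instance

-- ===== CLAIM (what is proved, stated in full; the proofs are below) =====
def Claim_equal_selectively_hex_encode : Prop := ∀ (payload : String) (times : Int), Dom_selectively_hex_encode payload times → Spec_selectively_hex_encode payload times (selectively_hex_encode payload times)

-- ===== LEMMAS AND PROOFS =====

-- the per-character encoding as a function
def pvEnc (c : Char) : List Char :=
  if c = '<' then ['%', '3', 'C'] else if c = '>' then ['%', '3', 'E'] else [c]

-- substituting one character: the meaning of s.replace(c, new) for a length-1 pattern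
def pvSub (c : Char) (new : List Char) (x : Char) : List Char :=
  if x = c then new else [x]

theorem pvReplace_go_single (c : Char) (new : List Char) :
    ∀ (l : List Char) (fuel : Nat) (acc : List Char), l.length ≤ fuel →
      PySem.Chars.replace.go [c] new fuel l acc = acc.reverse ++ l.flatMap (pvSub c new) := by
  intro l
  induction l with
  | nil =>
    intro fuel acc _
    cases fuel <;> simp [PySem.Chars.replace.go]
  | cons x t ih =>
    intro fuel acc hf
    cases fuel with
    | zero => simp at hf
    | succ n =>
      by_cases hx : x = c
      · have hpre : [c].isPrefixOf (x :: t) = true := by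
          simp [List.isPrefixOf, hx]
        rw [PySem.Chars.replace.go, if_pos hpre]
        simp only [List.length_cons] at hf
        have hd : List.drop ([c].length) (x :: t) = t := by simp
        rw [hd, ih n (new.reverse ++ acc) (by omega)]
        simp [pvSub, hx]
      · have hpre : [c].isPrefixOf (x :: t) = false := by
          simp [List.isPrefixOf]
          exact fun h => hx h.symm
        rw [PySem.Chars.replace.go, if_neg (by simp [hpre])]
        simp only [List.length_cons] at hf
        rw [ih n (x :: acc) (by omega)]
        simp [pvSub, hx]

theorem pvReplace_single (c : Char) (new s : List Char) :
    PySem.Chars.replace s [c] new = s.flatMap (pvSub c new) := by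
  rw [PySem.Chars.replace, if_neg (by simp)]
  exact pvReplace_go_single c new s s.length [] le_rfl

theorem pvHexStep_eq (p : String) :
    pvHexStep p = String.ofList (p.toList.flatMap pvEnc) := by
  unfold pvHexStep
  rw [PySem.List.foldl_append_eq_flatMap]
  rfl

-- the two replace passes of B compute exactly one encoding pass
theorem pvReplace_pair (p : String) :
    PySem.Str.replace (PySem.Str.replace p "<" "%3C") ">" "%3E" =
      String.ofList (p.toList.flatMap pvEnc) := by
  unfold PySem.Str.replace
  have h1 : ("<" : String).toList = ['<'] := rfl
  have h2 : (">" : String).toList = ['>'] := rfl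
  have h3 : ("%3C" : String).toList = ['%', '3', 'C'] := rfl
  have h4 : ("%3E" : String).toList = ['%', '3', 'E'] := rfl
  rw [h1, h3, pvReplace_single]
  rw [String.toList_ofList]
  rw [h2, h4, pvReplace_single]
  congr 1
  rw [List.flatMap_assoc]
  apply List.flatMap_congr  -- pointwise equality of the composed substitution with pvEnc
  intro x _
  by_cases hlt : x = '<'
  · simp [pvSub, pvEnc, hlt]
  · by_cases hgt : x = '>'
    · simp [pvSub, pvEnc, hgt]
    · simp [pvSub, pvEnc, hlt, hgt]

-- encoding is idempotent: pvEnc output contains no '<' or '>'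
theorem pvEnc_idem (l : List Char) :
    (l.flatMap pvEnc).flatMap pvEnc = l.flatMap pvEnc := by
  rw [List.flatMap_assoc]
  apply List.flatMap_congr
  intro x _
  by_cases hlt : x = '<'
  · simp [pvEnc, hlt]
  · by_cases hgt : x = '>'
    · simp [pvEnc, hgt]
    · simp [pvEnc, hlt, hgt]

theorem pvHexStep_fixed (p : String) : pvHexStep (pvHexStep p) = pvHexStep p := by
  rw [pvHexStep_eq, pvHexStep_eq]
  rw [String.toList_ofList, pvEnc_idem]

theorem pvFoldl_fixed (l : List Int) (q : String) (hq : pvHexStep q = q) :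
    l.foldl (fun p _ => pvHexStep p) q = q := by
  induction l with
  | nil => rfl
  | cons x t ih => simp [List.foldl_cons, hq, ih]

-- ===== VERDICT (by name: the statement is the Claim_ definition above) =====
theorem selectively_hex_encode_spec : Claim_equal_selectively_hex_encode := by
  intro payload times _
  unfold Spec_selectively_hex_encode selectively_hex_encode selectively_hex_encode_alt
  by_cases ht : 1 ≤ times
  · rw [if_pos ht]
    rw [PySem.List.pyRange_one_cons (by omega : (0:Int) < times)]
    rw [List.foldl_cons]
    rw [pvFoldl_fixed _ _ (pvHexStep_fixed payload)]
    rw [pvReplace_pair, pvHexStep_eq]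
  · rw [if_neg ht]
    rw [PySem.List.pyRange_one_eq_nil (by omega : times ≤ 0)]
    rfl
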